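-- pv_equiv track=rewrite | github.com/baesh3744/algorithm-solutions | programmers/level3/카드_짝_맞추기.py | ctrl_move
-- ===== SOURCE A (Python) =====
-- from typing import DefaultDict, List, Set, Tuple
--
-- Point = Tuple[int, int]
--
-- SIZE: int = 4
--
-- def is_range(ridx: int, cidx: int) -> bool:
--     return 0 <= ridx < SIZE and 0 <= cidx < SIZE
--
-- def ctrl_move(
--     board: List[List[int]],
--     start: Point,
--     move_ridx: int,
--     move_cidx: int,
--     card_list: Tuple[int, ...],
-- ) -> Point:
--     next_ridx, next_cidx = start
--     for _ in range(SIZE):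
--         next_ridx += move_ridx
--         next_cidx += move_cidx
--         if not is_range(next_ridx, next_cidx):
--             break
--         if board[next_ridx][next_cidx] in card_list:
--             return next_ridx, next_cidx
--     return next_ridx - move_ridx, next_cidx - move_cidx
-- ===== SOURCE B (Python) =====
-- SIZE = 4
--
-- def is_range(ridx, cidx):
--     return 0 <= ridx < SIZE and 0 <= cidx < SIZE
--
-- def ctrl_move(board, start, move_ridx, move_cidx, card_list):
--     # build the ray of in-range positions reachable in up to SIZE steps
--     path = []
--     for k in range(1, SIZE + 1):
--         r = start[0] + k * move_ridx
--         c = start[1] + k * move_cidx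
--         if not is_range(r, c):
--             break
--         path.append((r, c))
--     # first ray position holding a wanted card, else the ray's end, else start
--     for r, c in path:
--         if board[r][c] in card_list:
--             return r, c
--     return path[-1] if path else tuple(start)
-- ===== Notes on version B (the rewrite author's own statement) =====
-- stated objective: alternative
-- what changed: Replaces A's interleaved advance-and-check loop with a generate-then-search decomposition: first build the list of in-range ray positions (stopping at the first off-board step), then scan it for the first wanted card, falling back to the ray's end or to start.
-- intended difference: When the move is nonzero, the whole SIZE-step ray stays on the board and no ray cell holds a wanted card, A returns the position after SIZE-1 steps (its 'next - move' edge fallback misfires on loop exhaustion) while B returns the ray's last position, the intended 'move until card or edge' stopping cell. — e.g. on ctrl_move([[0,0,0,0],[0,0,0,0],[0,0,0,0],[0,0,0,0]], ((-1,0), 1, 0, [7])): A returns (2, 0), B returns (3, 0)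
import Mathlib
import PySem

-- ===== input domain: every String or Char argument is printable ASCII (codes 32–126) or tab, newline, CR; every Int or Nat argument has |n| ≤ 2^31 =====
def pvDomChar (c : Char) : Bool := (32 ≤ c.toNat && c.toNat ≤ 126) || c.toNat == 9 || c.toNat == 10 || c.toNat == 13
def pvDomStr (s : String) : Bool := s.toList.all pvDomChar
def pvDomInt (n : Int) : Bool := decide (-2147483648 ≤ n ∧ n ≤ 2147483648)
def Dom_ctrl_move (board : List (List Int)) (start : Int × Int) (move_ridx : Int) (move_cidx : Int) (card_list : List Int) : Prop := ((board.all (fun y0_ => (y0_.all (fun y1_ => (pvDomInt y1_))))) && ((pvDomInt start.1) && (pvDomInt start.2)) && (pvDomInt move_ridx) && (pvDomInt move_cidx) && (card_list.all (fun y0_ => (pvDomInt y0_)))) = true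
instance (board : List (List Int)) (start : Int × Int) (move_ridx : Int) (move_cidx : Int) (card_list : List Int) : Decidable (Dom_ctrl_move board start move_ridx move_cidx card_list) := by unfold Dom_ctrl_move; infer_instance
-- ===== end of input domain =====

-- B builds the in-range ray first and then searches it, instead of A's interleaved
-- advance-and-check loop (objective: alternative decomposition, same cost).

-- ===== PORT A =====
-- is_range of Source A
def pv_is_range (ridx : Int) (cidx : Int) : Bool :=
  decide (0 ≤ ridx ∧ ridx < 4 ∧ 0 ≤ cidx ∧ cidx < 4)

-- board[r][c]; exact whenever the cell exists in board (Pre_ctrl_move guarantees this at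
-- every index A actually evaluates; outside Pre_, Python raises IndexError there)
def pvCellA (board : List (List Int)) (r : Int) (c : Int) : Int :=
  (PySem.List.pyGet? ((PySem.List.pyGet? board r).getD []) c).getD 0

-- the 'for _ in range(SIZE)' loop of A; fuel counts remaining iterations,
-- fuel 0 / break both perform Python's shared 'return next - move'
def ctrl_move_go (board : List (List Int)) (card_list : List Int) (mr : Int) (mc : Int) :
    Nat → Int → Int → Int × Int
  | 0, r, c => (r - mr, c - mc)
  | n+1, r, c =>
    let r' := r + mr
    let c' := c + mc
    if !(pv_is_range r' c') then (r' - mr, c' - mc)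
    else if card_list.contains (pvCellA board r' c') then (r', c')
    else ctrl_move_go board card_list mr mc n r' c'

def ctrl_move (board : List (List Int)) (start : Int × Int) (move_ridx : Int) (move_cidx : Int) (card_list : List Int) : Int × Int :=
  ctrl_move_go board card_list move_ridx move_cidx 4 start.1 start.2

-- ===== PORT B =====
def pvCellB (board : List (List Int)) (r : Int) (c : Int) : Int :=
  (PySem.List.pyGet? ((PySem.List.pyGet? board r).getD []) c).getD 0

-- the path-building loop of Source B: positions start + k*move for k = 1..SIZE, cut at the first off-board one
def pvBuildPath (r0 : Int) (c0 : Int) (mr : Int) (mc : Int) : Nat → Int → List (Int × Int)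
  | 0, _ => []
  | n+1, k =>
    let r := r0 + k * mr
    let c := c0 + k * mc
    if pv_is_range r c then (r, c) :: pvBuildPath r0 c0 mr mc n (k+1) else []

-- the search loop of Source B: first path position whose board value is in card_list
def pvFindCard (board : List (List Int)) (card_list : List Int) : List (Int × Int) → Option (Int × Int)
  | [] => none
  | p :: ps =>
    if card_list.contains (pvCellB board p.1 p.2) then some p
    else pvFindCard board card_list ps

def ctrl_move_alt (board : List (List Int)) (start : Int × Int) (move_ridx : Int) (move_cidx : Int) (card_list : List Int) : Int × Int :=
  let path := pvBuildPath start.1 start.2 move_ridx move_cidx 4 1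
  match pvFindCard board card_list path with
  | some p => p
  | none => path.getLast?.getD start

-- ===== PRECONDITION & SPEC =====
-- helpers for stating Pre_: on-board test, cell-exists test, cell value (via getD; exact where the cell exists)
def pvInRB (r c : Int) : Bool := decide (0 ≤ r ∧ r < 4 ∧ 0 ≤ c ∧ c < 4)
def pvIdxOKB (board : List (List Int)) (r c : Int) : Bool :=
  decide (r.toNat < board.length) && decide (c.toNat < (board.getD r.toNat []).length)
def pvCellD (board : List (List Int)) (r c : Int) : Int :=
  (board.getD r.toNat []).getD c.toNat 0
-- 'ray cell k is on the board and holds no wanted card' (so A steps past it)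
def pvPassB (board : List (List Int)) (cl : List Int) (r c : Int) : Bool :=
  pvInRB r c && !(cl.contains (pvCellD board r c))

-- Pre_ is EXACTLY A's non-raising set: every board cell A actually evaluates must exist.
-- A reads ray cell k = start + k*move only if cells 1..k-1 were on the board and unmatched
-- and cell k is on the board; precisely those cells must be indexable in board (else
-- Python's board[r][c] raises IndexError). B reads the same cells, so B raises there too.
def Pre_ctrl_move (board : List (List Int)) (start : Int × Int) (move_ridx : Int) (move_cidx : Int) (card_list : List Int) : Prop :=
  ((!(pvInRB (start.1 + move_ridx) (start.2 + move_cidx)) ||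
      pvIdxOKB board (start.1 + move_ridx) (start.2 + move_cidx)) &&
   (!(pvPassB board card_list (start.1 + move_ridx) (start.2 + move_cidx) &&
      pvInRB (start.1 + 2*move_ridx) (start.2 + 2*move_cidx)) ||
      pvIdxOKB board (start.1 + 2*move_ridx) (start.2 + 2*move_cidx)) &&
   (!(pvPassB board card_list (start.1 + move_ridx) (start.2 + move_cidx) &&
      pvPassB board card_list (start.1 + 2*move_ridx) (start.2 + 2*move_cidx) &&
      pvInRB (start.1 + 3*move_ridx) (start.2 + 3*move_cidx)) ||
      pvIdxOKB board (start.1 + 3*move_ridx) (start.2 + 3*move_cidx)) &&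
   (!(pvPassB board card_list (start.1 + move_ridx) (start.2 + move_cidx) &&
      pvPassB board card_list (start.1 + 2*move_ridx) (start.2 + 2*move_cidx) &&
      pvPassB board card_list (start.1 + 3*move_ridx) (start.2 + 3*move_cidx) &&
      pvInRB (start.1 + 4*move_ridx) (start.2 + 4*move_cidx)) ||
      pvIdxOKB board (start.1 + 4*move_ridx) (start.2 + 4*move_cidx))) = true
instance (board : List (List Int)) (start : Int × Int) (move_ridx : Int) (move_cidx : Int) (card_list : List Int) : Decidable (Pre_ctrl_move board start move_ridx move_cidx card_list) := by unfold Pre_ctrl_move; infer_instance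

def pvWitness_ctrl_move : List (List Int) × (Int × Int) × Int × Int × List Int :=
  ([[0,0,0,0],[0,0,0,0],[0,0,0,0],[0,0,0,0]], ((0,0), 1, 1, []))

-- When the move is nonzero, every one of the SIZE ray positions start + k*move (k = 1..SIZE)
-- is on the board and none of them holds a card of card_list, A returns the position after
-- SIZE-1 steps (its 'next - move' edge fallback misfires on loop exhaustion) while B returns
-- the ray's last position, the intended 'move until card or edge' stopping cell.
def D_ctrl_move (board : List (List Int)) (start : Int × Int) (move_ridx : Int) (move_cidx : Int) (card_list : List Int) : Prop :=
  (move_ridx, move_cidx) ≠ (0, 0) ∧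
  ∀ k ∈ ([1, 2, 3, 4] : List Int),
    let r := start.1 + k * move_ridx
    let c := start.2 + k * move_cidx
    0 ≤ r ∧ r < 4 ∧ 0 ≤ c ∧ c < 4 ∧ (board.getD r.toNat []).getD c.toNat 0 ∉ card_list
instance (board : List (List Int)) (start : Int × Int) (move_ridx : Int) (move_cidx : Int) (card_list : List Int) : Decidable (D_ctrl_move board start move_ridx move_cidx card_list) := by unfold D_ctrl_move; infer_instance

def Spec_ctrl_move (board : List (List Int)) (start : Int × Int) (move_ridx : Int) (move_cidx : Int) (card_list : List Int) (out : Int × Int) : Prop := ¬ D_ctrl_move board start move_ridx move_cidx card_list → out = ctrl_move_alt board start move_ridx move_cidx card_list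
instance (board : List (List Int)) (start : Int × Int) (move_ridx : Int) (move_cidx : Int) (card_list : List Int) (out : Int × Int) : Decidable (Spec_ctrl_move board start move_ridx move_cidx card_list out) := by unfold Spec_ctrl_move; infer_instance

def pvDiffWitness_ctrl_move : List (List Int) × (Int × Int) × Int × Int × List Int :=
  ([[0,0,0,0],[0,0,0,0],[0,0,0,0],[0,0,0,0]], ((-1,0), 1, 0, [7]))
def pvDiffWitnessOut_ctrl_move : (Int × Int) × (Int × Int) := ((2, 0), (3, 0))

-- ===== CLAIM (what is proved, stated in full; the proofs are below) =====
def Claim_unchanged_ctrl_move : Prop := ∀ (board : List (List Int)) (start : Int × Int) (move_ridx : Int) (move_cidx : Int) (card_list : List Int), Dom_ctrl_move board start move_ridx move_cidx card_list → Pre_ctrl_move board start move_ridx move_cidx card_list → Spec_ctrl_move board start move_ridx move_cidx card_list (ctrl_move board start move_ridx move_cidx card_list)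
def Claim_changed_ctrl_move : Prop := Dom_ctrl_move (pvDiffWitness_ctrl_move.1) (pvDiffWitness_ctrl_move.2.1) (pvDiffWitness_ctrl_move.2.2.1) (pvDiffWitness_ctrl_move.2.2.2.1) (pvDiffWitness_ctrl_move.2.2.2.2) ∧ Pre_ctrl_move (pvDiffWitness_ctrl_move.1) (pvDiffWitness_ctrl_move.2.1) (pvDiffWitness_ctrl_move.2.2.1) (pvDiffWitness_ctrl_move.2.2.2.1) (pvDiffWitness_ctrl_move.2.2.2.2) ∧ D_ctrl_move (pvDiffWitness_ctrl_move.1) (pvDiffWitness_ctrl_move.2.1) (pvDiffWitness_ctrl_move.2.2.1) (pvDiffWitness_ctrl_move.2.2.2.1) (pvDiffWitness_ctrl_move.2.2.2.2) ∧ ctrl_move (pvDiffWitness_ctrl_move.1) (pvDiffWitness_ctrl_move.2.1) (pvDiffWitness_ctrl_move.2.2.1) (pvDiffWitness_ctrl_move.2.2.2.1) (pvDiffWitness_ctrl_move.2.2.2.2) = pvDiffWitnessOut_ctrl_move.1 ∧ ctrl_move_alt (pvDiffWitness_ctrl_move.1) (pvDiffWitness_ctrl_move.2.1) (pvDiffWitness_ctrl_move.2.2.1)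 (pvDiffWitness_ctrl_move.2.2.2.1) (pvDiffWitness_ctrl_move.2.2.2.2) = pvDiffWitnessOut_ctrl_move.2 ∧ pvDiffWitnessOut_ctrl_move.1 ≠ pvDiffWitnessOut_ctrl_move.2
def Claim_exact_ctrl_move : Prop := ∀ (board : List (List Int)) (start : Int × Int) (move_ridx : Int) (move_cidx : Int) (card_list : List Int), Dom_ctrl_move board start move_ridx move_cidx card_list → Pre_ctrl_move board start move_ridx move_cidx card_list → D_ctrl_move board start move_ridx move_cidx card_list → ctrl_move board start move_ridx move_cidx card_list ≠ ctrl_move_alt board start move_ridx move_cidx card_list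

-- ===== LEMMAS AND PROOFS =====
theorem goA_zero (b : List (List Int)) (cl : List Int) (mr mc r c : Int) :
    ctrl_move_go b cl mr mc 0 r c = (r - mr, c - mc) := rfl
theorem goA_succ (b : List (List Int)) (cl : List Int) (mr mc : Int) (n : Nat) (r c : Int) :
    ctrl_move_go b cl mr mc (n+1) r c =
      if !(pv_is_range (r+mr) (c+mc)) then (r+mr-mr, c+mc-mc)
      else if cl.contains (pvCellA b (r+mr) (c+mc)) then (r+mr, c+mc)
      else ctrl_move_go b cl mr mc n (r+mr) (c+mc) := rfl
theorem pathB_zero (r0 c0 mr mc k : Int) : pvBuildPath r0 c0 mr mc 0 k = [] := rfl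
theorem pathB_succ (r0 c0 mr mc : Int) (n : Nat) (k : Int) :
    pvBuildPath r0 c0 mr mc (n+1) k =
      if pv_is_range (r0 + k*mr) (c0 + k*mc) then (r0 + k*mr, c0 + k*mc) :: pvBuildPath r0 c0 mr mc n (k+1) else [] := rfl
theorem findB_nil (b : List (List Int)) (cl : List Int) : pvFindCard b cl [] = none := rfl
theorem findB_cons (b : List (List Int)) (cl : List Int) (p : Int × Int) (ps : List (Int × Int)) :
    pvFindCard b cl (p :: ps) = if cl.contains (pvCellA b p.1 p.2) then some p else pvFindCard b cl ps := rfl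

theorem D_cell (board : List (List Int)) (r c : Int) (hr : 0 ≤ r) (hc : 0 ≤ c) :
    (board.getD r.toNat []).getD c.toNat 0 = pvCellA board r c := by
  simp [pvCellA, PySem.List.pyGet?_of_nonneg, hr, hc, List.getD_eq_getElem?_getD]

theorem if_not_swap {a : Type} (x : Bool) (p q : a) : (if !x then p else q) = if x then q else p := by
  cases x <;> rfl

theorem AB_eq (board : List (List Int)) (r0 c0 mr mc : Int) (cl : List Int)
    (hnD : ¬ D_ctrl_move board (r0, c0) mr mc cl) :
    ctrl_move board (r0, c0) mr mc cl = ctrl_move_alt board (r0, c0) mr mc cl := by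
  simp only [ctrl_move, ctrl_move_alt, goA_succ, pathB_succ, goA_zero, pathB_zero, if_not_swap]
  ring_nf
  by_cases h1 : pv_is_range (r0 + mr) (c0 + mc) = true
  case neg =>
    rw [Bool.not_eq_true] at h1
    simp [h1, findB_nil]
  case pos =>
  by_cases m1 : pvCellA board (r0 + mr) (c0 + mc) ∈ cl
  case pos => simp [h1, m1, findB_cons]
  case neg =>
  by_cases h2 : pv_is_range (r0 + mr * 2) (c0 + mc * 2) = true
  case neg =>
    rw [Bool.not_eq_true] at h2
    simp [h1, m1, h2, findB_cons, findB_nil]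
  case pos =>
  by_cases m2 : pvCellA board (r0 + mr * 2) (c0 + mc * 2) ∈ cl
  case pos => simp [h1, m1, h2, m2, findB_cons]
  case neg =>
  by_cases h3 : pv_is_range (r0 + mr * 3) (c0 + mc * 3) = true
  case neg =>
    rw [Bool.not_eq_true] at h3
    simp [h1, m1, h2, m2, h3, findB_cons, findB_nil]
  case pos =>
  by_cases m3 : pvCellA board (r0 + mr * 3) (c0 + mc * 3) ∈ cl
  case pos => simp [h1, m1, h2, m2, h3, m3, findB_cons]
  case neg =>
  by_cases h4 : pv_is_range (r0 + mr * 4) (c0 + mc * 4) = true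
  case neg =>
    rw [Bool.not_eq_true] at h4
    simp [h1, m1, h2, m2, h3, m3, h4, findB_cons, findB_nil]
  case pos =>
  by_cases m4 : pvCellA board (r0 + mr * 4) (c0 + mc * 4) ∈ cl
  case pos => simp [h1, m1, h2, m2, h3, m3, h4, m4, findB_cons]
  case neg =>
  -- all four steps in range, no card found: only possible outside D_ when the move is zero
  have hb1 : 0 ≤ r0 + mr ∧ r0 + mr < 4 ∧ 0 ≤ c0 + mc ∧ c0 + mc < 4 := by
    simpa [pv_is_range] using h1
  have hb2 : 0 ≤ r0 + mr * 2 ∧ r0 + mr * 2 < 4 ∧ 0 ≤ c0 + mc * 2 ∧ c0 + mc * 2 < 4 := by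
    simpa [pv_is_range] using h2
  have hb3 : 0 ≤ r0 + mr * 3 ∧ r0 + mr * 3 < 4 ∧ 0 ≤ c0 + mc * 3 ∧ c0 + mc * 3 < 4 := by
    simpa [pv_is_range] using h3
  have hb4 : 0 ≤ r0 + mr * 4 ∧ r0 + mr * 4 < 4 ∧ 0 ≤ c0 + mc * 4 ∧ c0 + mc * 4 < 4 := by
    simpa [pv_is_range] using h4
  have hmz : mr = 0 ∧ mc = 0 := by
    by_contra hne
    apply hnD
    refine ⟨by simpa [Prod.ext_iff] using hne, ?_⟩
    intro k hk
    simp only [List.mem_cons, List.not_mem_nil, or_false] at hk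
    dsimp only
    rcases hk with rfl | rfl | rfl | rfl
    · rw [show r0 + 1 * mr = r0 + mr by ring, show c0 + 1 * mc = c0 + mc by ring]
      exact ⟨hb1.1, hb1.2.1, hb1.2.2.1, hb1.2.2.2,
        by rw [D_cell board _ _ hb1.1 hb1.2.2.1]; exact m1⟩
    · rw [show r0 + 2 * mr = r0 + mr * 2 by ring, show c0 + 2 * mc = c0 + mc * 2 by ring]
      exact ⟨hb2.1, hb2.2.1, hb2.2.2.1, hb2.2.2.2,
        by rw [D_cell board _ _ hb2.1 hb2.2.2.1]; exact m2⟩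
    · rw [show r0 + 3 * mr = r0 + mr * 3 by ring, show c0 + 3 * mc = c0 + mc * 3 by ring]
      exact ⟨hb3.1, hb3.2.1, hb3.2.2.1, hb3.2.2.2,
        by rw [D_cell board _ _ hb3.1 hb3.2.2.1]; exact m3⟩
    · rw [show r0 + 4 * mr = r0 + mr * 4 by ring, show c0 + 4 * mc = c0 + mc * 4 by ring]
      exact ⟨hb4.1, hb4.2.1, hb4.2.2.1, hb4.2.2.2,
        by rw [D_cell board _ _ hb4.1 hb4.2.2.1]; exact m4⟩
  obtain ⟨rfl, rfl⟩ := hmz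
  norm_num at h1 m1
  simp [h1, m1, findB_cons, findB_nil]

theorem AB_ne (board : List (List Int)) (r0 c0 mr mc : Int) (cl : List Int)
    (hD : D_ctrl_move board (r0, c0) mr mc cl) :
    ctrl_move board (r0, c0) mr mc cl ≠ ctrl_move_alt board (r0, c0) mr mc cl := by
  obtain ⟨hne, hall⟩ := hD
  have hh1 := hall 1 (by simp)
  simp only [] at hh1
  obtain ⟨q1a, q1b, q1c, q1d, mm1⟩ := hh1
  have hh2 := hall 2 (by simp)
  simp only [] at hh2
  obtain ⟨q2a, q2b, q2c, q2d, mm2⟩ := hh2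
  have hh3 := hall 3 (by simp)
  simp only [] at hh3
  obtain ⟨q3a, q3b, q3c, q3d, mm3⟩ := hh3
  have hh4 := hall 4 (by simp)
  simp only [] at hh4
  obtain ⟨q4a, q4b, q4c, q4d, mm4⟩ := hh4
  rw [show r0 + 1 * mr = r0 + mr by ring] at q1a q1b mm1
  rw [show c0 + 1 * mc = c0 + mc by ring] at q1c q1d mm1
  rw [show r0 + 2 * mr = r0 + mr * 2 by ring] at q2a q2b mm2
  rw [show c0 + 2 * mc = c0 + mc * 2 by ring] at q2c q2d mm2
  rw [show r0 + 3 * mr = r0 + mr * 3 by ring] at q3a q3b mm3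
  rw [show c0 + 3 * mc = c0 + mc * 3 by ring] at q3c q3d mm3
  rw [show r0 + 4 * mr = r0 + mr * 4 by ring] at q4a q4b mm4
  rw [show c0 + 4 * mc = c0 + mc * 4 by ring] at q4c q4d mm4
  have g1 : pv_is_range (r0 + mr) (c0 + mc) = true := by
    simp only [pv_is_range, decide_eq_true_eq]; omega
  have g2 : pv_is_range (r0 + mr * 2) (c0 + mc * 2) = true := by
    simp only [pv_is_range, decide_eq_true_eq]; omega
  have g3 : pv_is_range (r0 + mr * 3) (c0 + mc * 3) = true := by
    simp only [pv_is_range, decide_eq_true_eq]; omega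
  have g4 : pv_is_range (r0 + mr * 4) (c0 + mc * 4) = true := by
    simp only [pv_is_range, decide_eq_true_eq]; omega
  rw [D_cell board _ _ (by omega) (by omega)] at mm1
  rw [D_cell board _ _ (by omega) (by omega)] at mm2
  rw [D_cell board _ _ (by omega) (by omega)] at mm3
  rw [D_cell board _ _ (by omega) (by omega)] at mm4
  have hne' : ¬(mr = 0 ∧ mc = 0) := by simpa [Prod.ext_iff] using hne
  simp only [ctrl_move, ctrl_move_alt, goA_succ, pathB_succ, goA_zero, pathB_zero, if_not_swap]
  ring_nf
  simp [g1, mm1, g2, mm2, g3, mm3, g4, mm4, findB_cons, findB_nil, Prod.mk.injEq]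
  omega

-- ===== VERDICT (by name: the statement is the Claim_ definition above) =====
theorem ctrl_move_spec : Claim_unchanged_ctrl_move := by
  intro board start mr mc cl _ _ hnD
  obtain ⟨r0, c0⟩ := start
  exact AB_eq board r0 c0 mr mc cl hnD

theorem ctrl_move_changed : Claim_changed_ctrl_move := by unfold Claim_changed_ctrl_move; decide

theorem ctrl_move_tight : Claim_exact_ctrl_move := by
  intro board start mr mc cl _ _ hD
  obtain ⟨r0, c0⟩ := start
  exact AB_ne board r0 c0 mr mc cl hD
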